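-- pv_equiv track=rewrite | github.com/manwar/perlweeklychallenge-club | challenge-309/lubos-kolouch/python/ch-1.py | min_gap
-- ===== SOURCE A (Python) =====
-- from typing import Optional
--
-- IntList = list[int]
--
-- def min_gap(arr: IntList) -> Optional[int]:
--     """
--     Return the element after which the smallest gap occurs.
--
--     For an array [a, b, c, ...], the gap is defined as:
--         gap = current_element - previous_element.
--
--     The function returns the element appearing immediately after the smallest gap.
--     In case of a tie, the first occurrence is returned.
--     If the array has fewer than two elements, None is returned.
--
--     :param arr: A list of integers in increasing order.
--     :return: The element after which the smallest gap is observed, or None if not applicable.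
--     """
--     if len(arr) < 2:
--         return None  # Not enough elements to form a gap
--
--     min_delta = float('inf')
--     candidate: Optional[int] = None
--
--     # Loop from the second element to the end to calculate gaps
--     for i in range(1, len(arr)):
--         diff = arr[i] - arr[i - 1]
--         if diff < min_delta:
--             min_delta = diff
--             candidate = arr[i]
--
--     return candidate
-- ===== SOURCE B (Python) =====
-- from typing import Optional
--
-- IntList = list[int]
--
-- def min_gap(arr: IntList) -> Optional[int]:
--     """Table-based rewrite: build the consecutive-gap list, take its minimum,
--     and return the element following the first minimal gap."""
--     if len(arr) < 2:
--         return None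
--     deltas = [b - a for a, b in zip(arr, arr[1:])]
--     m = min(deltas)
--     return arr[deltas.index(m) + 1]
-- ===== Notes on version B (the rewrite author's own statement) =====
-- stated objective: simpler
-- what changed: Replaces the interleaved min-tracking scan with float('inf')/None sentinels by building the gap table once, then a plain min reduction and a first-index lookup (first-occurrence tie-breaking preserved by min/.index).
import Mathlib
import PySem

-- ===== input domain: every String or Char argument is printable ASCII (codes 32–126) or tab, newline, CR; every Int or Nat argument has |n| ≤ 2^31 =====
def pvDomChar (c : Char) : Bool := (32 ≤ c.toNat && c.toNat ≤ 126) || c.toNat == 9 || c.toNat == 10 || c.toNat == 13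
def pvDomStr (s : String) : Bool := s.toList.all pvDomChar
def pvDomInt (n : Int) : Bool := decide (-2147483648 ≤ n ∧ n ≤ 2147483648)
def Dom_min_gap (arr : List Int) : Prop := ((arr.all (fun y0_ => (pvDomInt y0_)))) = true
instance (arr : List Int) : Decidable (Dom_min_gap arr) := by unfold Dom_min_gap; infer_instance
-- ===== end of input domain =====

-- B changes decomposition only (gap table + min + index instead of one interleaved
-- min-tracking scan with sentinels); objective: simpler, same cost.

-- ===== PORT A =====
-- the loop body of A: state = (min_delta : Option Int (none = float('inf')), candidate)
def minGapStep (arr : List Int) (s : Option Int × Option Int) (i : Int) :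
    Option Int × Option Int :=
  let diff := PySem.List.pyGetD arr i 0 - PySem.List.pyGetD arr (i - 1) 0
  match s.1 with
  | none => (some diff, some (PySem.List.pyGetD arr i 0))
  | some m =>
    if diff < m then (some diff, some (PySem.List.pyGetD arr i 0)) else s

def min_gap (arr : List Int) : Option Int :=
  if arr.length < 2 then none
  else
    ((PySem.List.pyRange 1 (arr.length : Int) 1).foldl (minGapStep arr)
      (none, none)).2

-- ===== PORT B =====
def min_gap_alt (arr : List Int) : Option Int :=
  if arr.length < 2 then none
  else
    let deltas :=
      (arr.zip (PySem.List.slice arr (some 1) none)).map (fun p => p.2 - p.1)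
    match PySem.List.min? deltas (fun y => y) with
    | none => none
    | some m =>
      match PySem.List.index? deltas m with
      | none => none
      | some k => PySem.List.pyGet? arr ((k : Int) + 1)

-- ===== PRECONDITION & SPEC =====
def Spec_min_gap (arr : List Int) (out : Option Int) : Prop := out = min_gap_alt arr
instance (arr : List Int) (out : Option Int) : Decidable (Spec_min_gap arr out) := by unfold Spec_min_gap; infer_instance

-- ===== CLAIM (what is proved, stated in full; the proofs are below) =====
def Claim_equal_min_gap : Prop := ∀ (arr : List Int), Dom_min_gap arr → Spec_min_gap arr (min_gap arr)

-- ===== LEMMAS AND PROOFS =====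

-- abstract version of A's loop body over (gap, following element) pairs
def pairStep (s : Option Int × Option Int) (p : Int × Int) :
    Option Int × Option Int :=
  match s.1 with
  | none => (some p.1, some p.2)
  | some m => if p.1 < m then (some p.1, some p.2) else s

-- the pair list both sides are about
def gapPairs (arr : List Int) : List (Int × Int) :=
  (arr.zip arr.tail).map (fun p => (p.2 - p.1, p.2))

lemma foldl_min_le_self (ds : List Int) (m0 : Int) : ds.foldl min m0 ≤ m0 := by
  induction ds generalizing m0 with
  | nil => simp
  | cons d t ih => exact le_trans (ih (min m0 d)) (min_le_left _ _)

lemma foldl_min_le_mem : ∀ (ds : List Int) (m0 e : Int), e ∈ ds → ds.foldl min m0 ≤ e := by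
  intro ds
  induction ds with
  | nil => intro m0 e he; simp at he
  | cons d t ih =>
    intro m0 e he
    rcases List.mem_cons.mp he with h | h
    · subst h
      exact le_trans (foldl_min_le_self t (min m0 e)) (min_le_right _ _)
    · exact ih (min m0 d) e h

lemma foldl_min_of_forall_le (ds : List Int) (m0 : Int)
    (h : ∀ e ∈ ds, m0 ≤ e) : ds.foldl min m0 = m0 := by
  induction ds generalizing m0 with
  | nil => rfl
  | cons d t ih =>
    have hd : m0 ≤ d := h d (List.mem_cons_self ..)
    simp only [List.foldl_cons, min_eq_left hd]
    exact ih m0 (fun e he => h e (List.mem_cons_of_mem _ he))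

-- characterisation of A's loop after the first step
lemma pairStep_aux (t : List (Int × Int)) (m0 c0 : Int) :
    (t.foldl pairStep (some m0, some c0)).2 =
      if ∃ e ∈ t.map Prod.fst, e < m0 then
        (PySem.List.index? (t.map Prod.fst)
            ((t.map Prod.fst).foldl min m0)).bind
          (fun k => (t.map Prod.snd)[k]?)
      else some c0 := by
  induction t generalizing m0 c0 with
  | nil => simp
  | cons p t ih =>
    obtain ⟨d, x⟩ := p
    by_cases hd : d < m0
    · have hstep : pairStep (some m0, some c0) (d, x) = (some d, some x) := by
        simp [pairStep, hd]
      rw [List.foldl_cons, hstep, ih]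
      have hex : ∃ e ∈ (((d, x) :: t).map Prod.fst), e < m0 :=
        ⟨d, by simp, hd⟩
      rw [if_pos hex]
      by_cases hext : ∃ e ∈ t.map Prod.fst, e < d
      · rw [if_pos hext]
        have hM : (((d, x) :: t).map Prod.fst).foldl min m0
            = (t.map Prod.fst).foldl min d := by
          simp [min_eq_right (le_of_lt hd)]
        obtain ⟨e, he, hed⟩ := hext
        have hMlt : (t.map Prod.fst).foldl min d < d :=
          lt_of_le_of_lt (foldl_min_le_mem _ _ _ he) hed
        have hne : d ≠ (t.map Prod.fst).foldl min d := (ne_of_gt hMlt)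
        rw [hM, show (((d, x) :: t).map Prod.fst) = d :: t.map Prod.fst from by simp,
          PySem.List.index?_cons_of_ne _ hne]
        cases PySem.List.index? (t.map Prod.fst) ((t.map Prod.fst).foldl min d) with
        | none => rfl
        | some k => simp
      · rw [if_neg hext]
        push_neg at hext
        have hM : (((d, x) :: t).map Prod.fst).foldl min m0 = d := by
          simp only [List.map_cons, List.foldl_cons, min_eq_right (le_of_lt hd)]
          exact foldl_min_of_forall_le _ _ hext
        rw [hM, show (((d, x) :: t).map Prod.fst) = d :: t.map Prod.fst from by simp,
          PySem.List.index?_cons_self]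
        simp
    · have hstep : pairStep (some m0, some c0) (d, x) = (some m0, some c0) := by
        simp [pairStep, hd]
      rw [List.foldl_cons, hstep, ih]
      by_cases hex : ∃ e ∈ t.map Prod.fst, e < m0
      · rw [if_pos hex, if_pos (by obtain ⟨e, he, h⟩ := hex; exact ⟨e, by simp [he], h⟩)]
        have hM : (((d, x) :: t).map Prod.fst).foldl min m0
            = (t.map Prod.fst).foldl min m0 := by
          simp [min_eq_left (le_of_not_gt hd)]
        obtain ⟨e, he, hem⟩ := hex
        have hMlt : (t.map Prod.fst).foldl min m0 < m0 :=
          lt_of_le_of_lt (foldl_min_le_mem _ _ _ he) hem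
        have hne : d ≠ (t.map Prod.fst).foldl min m0 :=
          ne_of_gt (lt_of_lt_of_le hMlt (le_of_not_gt hd))
        rw [hM, show (((d, x) :: t).map Prod.fst) = d :: t.map Prod.fst from by simp,
          PySem.List.index?_cons_of_ne _ hne]
        cases PySem.List.index? (t.map Prod.fst) ((t.map Prod.fst).foldl min m0) with
        | none => rfl
        | some k => simp
      · rw [if_neg hex, if_neg]
        push_neg at hex ⊢
        intro e he
        rw [List.map_cons] at he
        rcases List.mem_cons.mp he with h | h
        · subst h; exact le_of_not_gt hd
        · exact hex e h

-- A's loop over a nonempty pair list computes "element after the first minimal gap"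
lemma pairStep_min_index (p : Int × Int) (t : List (Int × Int)) :
    (((p :: t).foldl pairStep (none, none)).2) =
      (PySem.List.min? ((p :: t).map Prod.fst) (fun y => y)).bind
        (fun m => (PySem.List.index? ((p :: t).map Prod.fst) m).bind
          (fun k => ((p :: t).map Prod.snd)[k]?)) := by
  obtain ⟨d, x⟩ := p
  have h1 : ((d, x) :: t).foldl pairStep (none, none)
      = t.foldl pairStep (some d, some x) := by
    simp [pairStep]
  rw [h1, pairStep_aux,
    show (((d, x) :: t).map Prod.fst) = d :: t.map Prod.fst from by simp,
    PySem.List.min?_id_cons]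
  simp only [Option.bind_some]
  by_cases hex : ∃ e ∈ t.map Prod.fst, e < d
  · rw [if_pos hex]
    obtain ⟨e, he, hed⟩ := hex
    have hMlt : (t.map Prod.fst).foldl min d < d :=
      lt_of_le_of_lt (foldl_min_le_mem _ _ _ he) hed
    rw [PySem.List.index?_cons_of_ne _ (ne_of_gt hMlt)]
    cases PySem.List.index? (t.map Prod.fst) ((t.map Prod.fst).foldl min d) with
    | none => rfl
    | some k => simp
  · rw [if_neg hex]
    push_neg at hex
    rw [foldl_min_of_forall_le _ _ hex, PySem.List.index?_cons_self]
    simp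

-- A's range loop is the pair-list loop
lemma min_gap_foldl_pairs (arr : List Int) (h2 : 2 ≤ arr.length) :
    (PySem.List.pyRange 1 (arr.length : Int) 1).foldl (minGapStep arr) (none, none)
      = (gapPairs arr).foldl pairStep (none, none) := by
  have hmap : (List.range (arr.length - 1)).map
      (fun k => (arr.getD (k + 1) 0 - arr.getD k 0, arr.getD (k + 1) 0))
      = gapPairs arr := by
    apply List.ext_getElem
    · simp [gapPairs, List.length_zip]
    · intro k hk hk'
      have hlen : k + 1 < arr.length := by
        simp at hk; omega
      simp [gapPairs, List.getD_eq_getElem?_getD, List.getElem?_eq_getElem hlen,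
        List.getElem?_eq_getElem (show k < arr.length by omega)]
  calc (PySem.List.pyRange 1 (arr.length : Int) 1).foldl (minGapStep arr) (none, none)
      = (List.range (arr.length - 1)).foldl
          (fun s (k : Nat) => minGapStep arr s (1 + (k : Int))) (none, none) := by
          rw [PySem.List.pyRange_one,
            show ((arr.length : Int) - 1).toNat = arr.length - 1 from by omega,
            List.foldl_map]
    _ = (List.range (arr.length - 1)).foldl
          (fun s k => pairStep s (arr.getD (k + 1) 0 - arr.getD k 0, arr.getD (k + 1) 0))
          (none, none) := by
          apply PySem.List.foldl_congr_mem
          intro s k hk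
          have h1 : (1 : Int) + (k : Int) = ((k + 1 : Nat) : Int) := by push_cast; ring
          have h2 : ((k + 1 : Nat) : Int) - 1 = ((k : Nat) : Int) := by push_cast; ring
          simp only [minGapStep, pairStep, h1, h2, PySem.List.pyGetD_natCast]
    _ = (gapPairs arr).foldl pairStep (none, none) := by
          rw [← hmap, List.foldl_map]

-- ===== VERDICT (by name: the statement is the Claim_ definition above) =====
theorem min_gap_spec : Claim_equal_min_gap := by
  intro arr _
  unfold Spec_min_gap min_gap min_gap_alt
  by_cases hlt : arr.length < 2
  · simp [hlt]
  · have h2 : 2 ≤ arr.length := by omega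
    rw [if_neg hlt, if_neg hlt, min_gap_foldl_pairs arr h2]
    have hne : gapPairs arr ≠ [] := by
      have : (gapPairs arr).length = min arr.length (arr.length - 1) := by
        simp [gapPairs, List.length_zip]
      intro h
      rw [h] at this
      simp at this
      omega
    obtain ⟨p, t, hpt⟩ := List.exists_cons_of_ne_nil hne
    rw [hpt, pairStep_min_index]
    have hfst : ((p :: t).map Prod.fst)
        = (arr.zip (PySem.List.slice arr (some 1) none)).map (fun p => p.2 - p.1) := by
      rw [PySem.List.slice_from_one, ← hpt]
      simp [gapPairs, List.map_map, Function.comp]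
    have hsnd : ((p :: t).map Prod.snd) = arr.tail := by
      rw [← hpt]
      have : (gapPairs arr).map Prod.snd = (arr.zip arr.tail).map Prod.snd := by
        simp [gapPairs, List.map_map, Function.comp]
      rw [this, List.map_snd_zip (by simp)]
    rw [hfst, hsnd]
    cases hm : PySem.List.min?
        ((arr.zip (PySem.List.slice arr (some 1) none)).map (fun p => p.2 - p.1))
        (fun y => y) with
    | none => simp only [hm, Option.bind_none]
    | some m =>
      cases hk : PySem.List.index?
          ((arr.zip (PySem.List.slice arr (some 1) none)).map (fun p => p.2 - p.1)) m with
      | none => simp only [hm, hk, Option.bind_some, Option.bind_none]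
      | some k =>
        simp only [hm, hk, Option.bind_some]
        rw [show ((k : Int) + 1) = ((k + 1 : Nat) : Int) from by push_cast; ring,
          PySem.List.pyGet?_natCast, List.getElem?_tail]
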